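-- pv_equiv track=rewrite | github.com/CiscoDevNet/intersight-ansible | plugins/modules/intersight_drive_security_policy.py | validate_passphrase
-- ===== SOURCE A (Python) =====
-- def validate_passphrase(passphrase, field_name):
--     """
--     Validate that a passphrase meets security requirements.
--     """
--     if not passphrase:
--         return True, None
--     if len(passphrase) < 8:
--         return False, f"{field_name} must be at least 8 characters long"
--     has_upper = any(c.isupper() for c in passphrase)
--     has_lower = any(c.islower() for c in passphrase)
--     has_digit = any(c.isdigit() for c in passphrase)
--     has_special = any(not c.isalnum() for c in passphrase)
--     if not (has_upper and has_lower and has_digit and has_special):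
--         return False, f"{field_name} must include at least one uppercase letter, one lowercase letter, one number, and one special character"
--     return True, None
-- ===== SOURCE B (Python) =====
-- def validate_passphrase(passphrase, field_name):
--     """
--     Validate that a passphrase meets security requirements.
--     """
--     if not passphrase:
--         return True, None
--     if len(passphrase) < 8:
--         return False, f"{field_name} must be at least 8 characters long"
--     has_upper = has_lower = has_digit = has_special = False
--     for c in passphrase:
--         if c.isupper():
--             has_upper = True
--         if c.islower():
--             has_lower = True
--         if c.isdigit():
--             has_digit = True
--         if not c.isalnum():
--             has_special = True
--         if has_upper and has_lower and has_digit and has_special: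
--             break
--     if not (has_upper and has_lower and has_digit and has_special):
--         return False, f"{field_name} must include at least one uppercase letter, one lowercase letter, one number, and one special character"
--     return True, None
-- ===== Notes on version B (the rewrite author's own statement) =====
-- stated objective: simpler
-- what changed: The four independent any() scans over the passphrase are collapsed into one single traversal that maintains the four flags and breaks early once all are set.
import Mathlib
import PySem

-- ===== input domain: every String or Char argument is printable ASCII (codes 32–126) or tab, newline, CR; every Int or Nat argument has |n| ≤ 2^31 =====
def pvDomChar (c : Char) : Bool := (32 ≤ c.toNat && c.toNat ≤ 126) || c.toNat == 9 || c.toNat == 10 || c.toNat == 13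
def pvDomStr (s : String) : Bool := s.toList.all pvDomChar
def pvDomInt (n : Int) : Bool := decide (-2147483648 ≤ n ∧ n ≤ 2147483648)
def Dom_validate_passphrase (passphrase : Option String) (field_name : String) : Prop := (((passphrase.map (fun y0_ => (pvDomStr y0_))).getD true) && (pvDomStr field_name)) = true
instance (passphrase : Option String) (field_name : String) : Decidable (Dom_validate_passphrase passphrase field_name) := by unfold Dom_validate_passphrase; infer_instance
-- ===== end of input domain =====

-- B replaces A's four independent any() scans by one loop over the characters that
-- maintains the four flags and breaks early once all are set (objective: simpler, one pass).

-- ===== PORT A =====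
def validate_passphrase (passphrase : Option String) (field_name : String) : Bool × Option String :=
  match passphrase with
  | none => (true, none)                              -- `not passphrase`: None is falsy
  | some p =>
    if p.toList = [] then (true, none)                -- `not passphrase`: "" is falsy
    else if PySem.Chars.len p.toList < 8 then
      (false, some (field_name ++ " must be at least 8 characters long"))
    else
      let has_upper := p.toList.any PySem.Chars.isupper
      let has_lower := p.toList.any PySem.Chars.islower
      let has_digit := p.toList.any PySem.Chars.isdigit
      let has_special := p.toList.any (fun c => !PySem.Chars.isalnum c)
      if !(has_upper && has_lower && has_digit && has_special) then
        (false, some (field_name ++ " must include at least one uppercase letter, one lowercase letter, one number, and one special character"))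
      else (true, none)

-- ===== PORT B =====
-- the single for-loop of Source B: four flags, early break once all are set
def vpLoop : List Char → Bool → Bool → Bool → Bool → Bool × Bool × Bool × Bool
  | [], u, l, d, s => (u, l, d, s)
  | c :: rest, u, l, d, s =>
    let u := if PySem.Chars.isupper c then true else u
    let l := if PySem.Chars.islower c then true else l
    let d := if PySem.Chars.isdigit c then true else d
    let s := if !PySem.Chars.isalnum c then true else s
    if u && l && d && s then (u, l, d, s)
    else vpLoop rest u l d s

def validate_passphrase_alt (passphrase : Option String) (field_name : String) : Bool × Option String :=
  match passphrase with
  | none => (true, none)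
  | some p =>
    if p.toList = [] then (true, none)
    else if PySem.Chars.len p.toList < 8 then
      (false, some (field_name ++ " must be at least 8 characters long"))
    else
      let r := vpLoop p.toList false false false false
      if !(r.1 && r.2.1 && r.2.2.1 && r.2.2.2) then
        (false, some (field_name ++ " must include at least one uppercase letter, one lowercase letter, one number, and one special character"))
      else (true, none)

-- ===== PRECONDITION & SPEC =====
def Spec_validate_passphrase (passphrase : Option String) (field_name : String) (out : Bool × Option String) : Prop := out = validate_passphrase_alt passphrase field_name
instance (passphrase : Option String) (field_name : String) (out : Bool × Option String) : Decidable (Spec_validate_passphrase passphrase field_name out) := by unfold Spec_validate_passphrase; infer_instance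

-- ===== CLAIM (what is proved, stated in full; the proofs are below) =====
def Claim_equal_validate_passphrase : Prop := ∀ (passphrase : Option String) (field_name : String), Dom_validate_passphrase passphrase field_name → Spec_validate_passphrase passphrase field_name (validate_passphrase passphrase field_name)

-- ===== LEMMAS AND PROOFS =====

-- the early-breaking flag loop computes exactly the four any() scans
theorem vpLoop_eq (cs : List Char) (u l d s : Bool) :
    vpLoop cs u l d s =
      (u || cs.any PySem.Chars.isupper,
       l || cs.any PySem.Chars.islower,
       d || cs.any PySem.Chars.isdigit,
       s || cs.any (fun c => !PySem.Chars.isalnum c)) := by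
  induction cs generalizing u l d s with
  | nil => simp [vpLoop]
  | cons c cs ih =>
    have step : ∀ (b x : Bool), (if b = true then true else x) = (x || b) := by decide
    simp only [vpLoop, step, List.any_cons]
    split_ifs with hb
    · simp only [Bool.and_eq_true, Bool.or_eq_true] at hb
      obtain ⟨⟨⟨h1, h2⟩, h3⟩, h4⟩ := hb
      simp only [← Bool.or_assoc]
      rcases h1 with h1 | h1 <;> rcases h2 with h2 | h2 <;> rcases h3 with h3 | h3 <;>
        rcases h4 with h4 | h4 <;> simp [h1, h2, h3, h4]
    · rw [ih]
      simp only [Bool.or_assoc]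

theorem validate_passphrase_spec : Claim_equal_validate_passphrase := by
  intro passphrase field_name _
  show validate_passphrase passphrase field_name = validate_passphrase_alt passphrase field_name
  match passphrase with
  | none => rfl
  | some p =>
    simp only [validate_passphrase, validate_passphrase_alt, vpLoop_eq, Bool.false_or]
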